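-- pv_equiv track=rewrite | github.com/zmunk/rosalind-solutions | cat.py | options
-- ===== SOURCE A (Python) =====
-- def options(loop, target):
--     a_count = 0
--     g_count = 0
--     for i, c in enumerate(loop):
--         if c == target and a_count == 0 and g_count == 0:
--             yield i
--
--         match c:
--             case "A":
--                 a_count += 1
--             case "U":
--                 a_count -= 1
--             case "G":
--                 g_count += 1
--             case "C":
--                 g_count -= 1
-- ===== SOURCE B (Python) =====
-- def options(loop, target):
--     # Two-pass: build the prefix-balance table first, then filter positions.
--     bal = [(0, 0)]
--     a = g = 0
--     for c in loop:
--         if c == "A":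
--             a += 1
--         elif c == "U":
--             a -= 1
--         elif c == "G":
--             g += 1
--         elif c == "C":
--             g -= 1
--         bal.append((a, g))
--     return (i for i, (b, c) in enumerate(zip(bal, loop)) if b == (0, 0) and c == target)
-- ===== Notes on version B (the rewrite author's own statement) =====
-- stated objective: alternative
-- what changed: A interleaves yielding with counter updates in one stateful generator loop; B first builds a prefix-balance table in one pass and then filters enumerate(zip(bal, loop)) in a second pass, with no live counters at filter time.
import Mathlib
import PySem

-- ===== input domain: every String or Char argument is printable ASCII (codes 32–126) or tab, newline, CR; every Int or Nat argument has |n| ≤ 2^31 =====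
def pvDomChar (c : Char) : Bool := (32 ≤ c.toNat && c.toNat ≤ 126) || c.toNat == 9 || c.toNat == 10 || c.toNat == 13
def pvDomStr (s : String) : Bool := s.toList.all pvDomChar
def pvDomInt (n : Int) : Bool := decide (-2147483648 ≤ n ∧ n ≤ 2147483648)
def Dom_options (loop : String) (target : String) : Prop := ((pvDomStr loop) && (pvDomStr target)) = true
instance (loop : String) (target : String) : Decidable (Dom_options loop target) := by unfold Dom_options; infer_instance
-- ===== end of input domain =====

-- B replaces A's single stateful generator loop by a prefix-balance table plus a filtering pass (alternative decomposition, same cost).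

-- ===== PORT A =====
-- A's single loop over enumerate(loop): yield check first, then the match-updates of the two counters.
def optionsGo (target : String) : List (Int × Char) → Int → Int → List Int
  | [], _, _ => []
  | (i, c) :: rest, a, g =>
    (if String.ofList [c] = target ∧ a = 0 ∧ g = 0 then [i] else []) ++
    (let a' := if c = 'A' then a + 1 else if c = 'U' then a - 1 else a
     let g' := if c = 'G' then g + 1 else if c = 'C' then g - 1 else g
     optionsGo target rest a' g')

def options (loop : String) (target : String) : List Int :=
  optionsGo target (PySem.List.enumerate loop.toList 0) 0 0

-- ===== PORT B =====
-- first pass of Source B: append the running (a, g) balance after each character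
def balGo : List Char → Int → Int → List (Int × Int)
  | [], _, _ => []
  | c :: rest, a, g =>
    let a' := if c = 'A' then a + 1 else if c = 'U' then a - 1 else a
    let g' := if c = 'G' then g + 1 else if c = 'C' then g - 1 else g
    (a', g') :: balGo rest a' g'

-- second pass of Source B: the generator expression over enumerate(zip(bal, loop))
def options_alt (loop : String) (target : String) : List Int :=
  let cs := loop.toList
  let bal : List (Int × Int) := (0, 0) :: balGo cs 0 0
  (PySem.List.enumerate (bal.zip cs) 0).filterMap
    (fun p => if p.2.1 = ((0 : Int), (0 : Int)) ∧ String.ofList [p.2.2] = target then some p.1 else none)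

-- ===== PRECONDITION & SPEC =====
def Spec_options (loop : String) (target : String) (out : List Int) : Prop := out = options_alt loop target
instance (loop : String) (target : String) (out : List Int) : Decidable (Spec_options loop target out) := by unfold Spec_options; infer_instance

-- ===== CLAIM (what is proved, stated in full; the proofs are below) =====
def Claim_equal_options : Prop := ∀ (loop : String) (target : String), Dom_options loop target → Spec_options loop target (options loop target)

-- ===== LEMMAS AND PROOFS =====
theorem optionsGo_eq_filter_bal (target : String) :
    ∀ (cs : List Char) (s a g : Int),
      optionsGo target (PySem.List.enumerate cs s) a g
      = (PySem.List.enumerate (((a, g) :: balGo cs a g).zip cs) s).filterMap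
          (fun p => if p.2.1 = ((0 : Int), (0 : Int)) ∧ String.ofList [p.2.2] = target then some p.1 else none) := by
  intro cs
  induction cs with
  | nil => intro s a g; simp [optionsGo, balGo, PySem.List.enumerate_nil]
  | cons c rest ih =>
    intro s a g
    simp only [PySem.List.enumerate_cons, optionsGo, balGo, List.zip_cons_cons,
      List.filterMap_cons]
    by_cases h : String.ofList [c] = target ∧ a = 0 ∧ g = 0
    · have hb : (a, g) = ((0 : Int), (0 : Int)) := by
        rcases h with ⟨_, ha, hg⟩; simp [ha, hg]
      simp [hb, h.1, h.2.1, h.2.2, ih]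
    · have h1 : ¬ ((a, g) = ((0 : Int), (0 : Int)) ∧ String.ofList [c] = target) := by
        rintro ⟨hb, ht⟩
        exact h ⟨ht, by simpa using congrArg Prod.fst hb, by simpa using congrArg Prod.snd hb⟩
      have h2 : ¬ ((a = 0 ∧ g = 0) ∧ String.ofList [c] = target) := by
        rintro ⟨⟨ha, hg⟩, ht⟩
        exact h ⟨ht, ha, hg⟩
      simp [h2, ih]
      tauto

-- ===== VERDICT (by name: the statement is the Claim_ definition above) =====
theorem options_spec : Claim_equal_options := by
  intro loop target _
  unfold Spec_options options options_alt
  exact optionsGo_eq_filter_bal target loop.toList 0 0 0
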